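-- pv_equiv track=rewrite | github.com/VladimirMonin/python315 | PYTHON/hw/hw_28.py | get_bad_letters_set
-- ===== SOURCE A (Python) =====
-- from typing import List, Dict, Any, Set
--
-- def get_bad_letters_set(cities_set: Set[str], unique_letters_set: Set[str]) -> Set[str]:
--     """
--     Функция для получения сета плохих букв. Ищет такие буквы, с которых не начинается
--     ни один город из сета городов.
--     :param unique_letters_set:
--     :param cities_set: Сет городов
--     :return: Сет плохих букв
--     """
--     bad_letters_set = set()
--
--     # Берем букву и идем проверять
--     for letter in unique_letters_set:
--         # Берем город и проверяем его первую букву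
--         for city in cities_set:
--             # Город НЕ плохой, буква НЕ плохая
--             # Нет смысла итерироваться дальше по городам
--             if city[0].lower() == letter:
--                 break
--         else:
--             # Цикл закончился без break - буква плохая
--             bad_letters_set.add(letter)
--
--     return bad_letters_set
-- ===== SOURCE B (Python) =====
-- def get_bad_letters_set(cities_set, unique_letters_set):
--     """Single elimination pass: start from all candidate letters and discard
--     each letter that actually starts some city."""
--     bad_letters_set = set(unique_letters_set)
--     for city in cities_set:
--         bad_letters_set.discard(city[0].lower())
--     return bad_letters_set
-- ===== Notes on version B (the rewrite author's own statement) =====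
-- stated objective: faster
-- what changed: Instead of A's per-letter scan over all cities (nested loops with for/else), B makes one pass over the cities, starting from a copy of the candidate letter set and discarding each letter that starts a city.
-- outside the precondition, e.g. on get_bad_letters_set({''}, set()): A returns set(), B raises IndexError
import Mathlib
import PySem

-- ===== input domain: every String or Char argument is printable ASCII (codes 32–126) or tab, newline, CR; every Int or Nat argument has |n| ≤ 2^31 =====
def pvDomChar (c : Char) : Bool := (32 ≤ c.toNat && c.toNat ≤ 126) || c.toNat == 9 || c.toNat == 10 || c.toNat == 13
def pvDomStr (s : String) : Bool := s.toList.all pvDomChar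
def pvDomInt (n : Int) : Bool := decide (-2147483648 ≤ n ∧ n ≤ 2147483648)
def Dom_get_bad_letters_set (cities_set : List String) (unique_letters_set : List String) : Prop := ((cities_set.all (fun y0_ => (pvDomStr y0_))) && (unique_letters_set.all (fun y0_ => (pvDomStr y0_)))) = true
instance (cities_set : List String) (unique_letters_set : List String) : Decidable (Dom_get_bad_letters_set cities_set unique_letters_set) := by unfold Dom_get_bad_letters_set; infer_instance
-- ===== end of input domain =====

-- B replaces A's per-letter scan over all cities by a single elimination pass over the
-- cities that discards from a copy of the candidate letter set (faster: one pass).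

-- city[0].lower(), shared by both ports (both Pythons compute exactly this);
-- total form: under Pre_ every city is nonempty, so pyGet? is some.
def pvFirstLower (city : String) : String :=
  String.ofList (PySem.Chars.lower (((PySem.Str.pyGet? city 0).map (fun c => [c])).getD []))

-- ===== PORT A =====
def get_bad_letters_set (cities_set : List String) (unique_letters_set : List String) : List String :=
  unique_letters_set.foldl
    (fun bad_letters_set letter =>
      -- inner for-city loop with break/else: break iff some city's first letter matches
      if cities_set.any (fun city => pvFirstLower city == letter)
      then bad_letters_set
      else PySem.Set.add bad_letters_set letter)
    PySem.Set.empty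

-- ===== PORT B =====
def get_bad_letters_set_alt (cities_set : List String) (unique_letters_set : List String) : List String :=
  cities_set.foldl
    (fun bad_letters_set city => PySem.Set.discard bad_letters_set (pvFirstLower city))
    (PySem.Set.ofList unique_letters_set)

-- ===== PRECONDITION & SPEC =====
-- Pre_ excludes city sets containing the empty string "": there A may raise IndexError on
-- city[0] (whether it does depends on Python's set iteration order), and B always raises.
def Pre_get_bad_letters_set (cities_set : List String) (unique_letters_set : List String) : Prop :=
  "" ∉ cities_set
instance (cities_set : List String) (unique_letters_set : List String) : Decidable (Pre_get_bad_letters_set cities_set unique_letters_set) := by unfold Pre_get_bad_letters_set; infer_instance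

def pvWitness_get_bad_letters_set : List String × List String := (["Moscow", "omsk"], ["m", "z"])

def Spec_get_bad_letters_set (cities_set : List String) (unique_letters_set : List String) (out : List String) : Prop := out = get_bad_letters_set_alt cities_set unique_letters_set
instance (cities_set : List String) (unique_letters_set : List String) (out : List String) : Decidable (Spec_get_bad_letters_set cities_set unique_letters_set out) := by unfold Spec_get_bad_letters_set; infer_instance

-- ===== CLAIM (what is proved, stated in full; the proofs are below) =====
def Claim_equal_get_bad_letters_set : Prop := ∀ (cities_set : List String) (unique_letters_set : List String), Dom_get_bad_letters_set cities_set unique_letters_set → Pre_get_bad_letters_set cities_set unique_letters_set → Spec_get_bad_letters_set cities_set unique_letters_set (get_bad_letters_set cities_set unique_letters_set)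

-- ===== LEMMAS AND PROOFS =====

-- "letter is bad": no city's lowered first letter equals it
def pvBad (cities : List String) (l : String) : Bool :=
  !(cities.any fun city => pvFirstLower city == l)

lemma pvDiscard_foldl (cities : List String) :
    ∀ s : List String,
      cities.foldl (fun bad city => PySem.Set.discard bad (pvFirstLower city)) s
        = s.filter (pvBad cities) := by
  induction cities with
  | nil =>
    intro s
    have h : ∀ x ∈ s, pvBad [] x = true := by intro x _; simp [pvBad]
    simpa using (List.filter_eq_self.mpr h).symm
  | cons c cs ih =>
    intro s
    rw [List.foldl_cons, ih]
    unfold PySem.Set.discard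
    rw [List.filter_filter]
    apply List.filter_congr
    intro x _
    simp only [pvBad, List.any_cons, Bool.not_or]
    rw [Bool.beq_comm, Bool.and_comm]

lemma pvAdd_filter (cities : List String) (l : String) (s : List String) :
    (if cities.any (fun city => pvFirstLower city == l)
       then s.filter (pvBad cities)
       else PySem.Set.add (s.filter (pvBad cities)) l)
      = (PySem.Set.add s l).filter (pvBad cities) := by
  have hb : (cities.any fun city => pvFirstLower city == l) = !(pvBad cities l) := by
    simp [pvBad]
  rw [hb]
  by_cases hm : l ∈ s
  · cases h : pvBad cities l
    · simp [PySem.Set.add, PySem.Set.contains, hm]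
    · have hmf : l ∈ s.filter (pvBad cities) := List.mem_filter.mpr ⟨hm, h⟩
      simp [PySem.Set.add, PySem.Set.contains, hm, hmf]
  · cases h : pvBad cities l
    · simp [PySem.Set.add, PySem.Set.contains, h, hm, List.filter_append]
    · have hmf : l ∉ s.filter (pvBad cities) := fun hx => hm (List.mem_filter.mp hx).1
      simp [PySem.Set.add, PySem.Set.contains, h, hm, hmf, List.filter_append]

lemma pvAddAll_filter (cities : List String) (letters : List String) :
    ∀ s : List String,
      letters.foldl
        (fun bad letter =>
          if cities.any (fun city => pvFirstLower city == letter)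
          then bad
          else PySem.Set.add bad letter)
        (s.filter (pvBad cities))
        = (letters.foldl PySem.Set.add s).filter (pvBad cities) := by
  induction letters with
  | nil => intro s; rfl
  | cons l ls ih =>
    intro s
    simp only [List.foldl_cons]
    rw [pvAdd_filter cities l s, ih]

-- ===== VERDICT (by name: the statement is the Claim_ definition above) =====
theorem get_bad_letters_set_spec : Claim_equal_get_bad_letters_set := by
  intro cities letters _ _
  show get_bad_letters_set cities letters = get_bad_letters_set_alt cities letters
  unfold get_bad_letters_set get_bad_letters_set_alt
  rw [pvDiscard_foldl, PySem.Set.ofList_eq_foldl]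
  have h0 : (PySem.Set.empty : List String) = ([] : List String).filter (pvBad cities) := rfl
  rw [h0, pvAddAll_filter]
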